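-- pv_equiv track=rewrite | github.com/santiagoneusa/DSA2 | Backtracking/tests/main.py | verificar
-- ===== SOURCE A (Python) =====
-- def verificar(aviones, aeropuerto, eventos):
--
--     if '==' not in aeropuerto: return 0
--     if len(aeropuerto) < 2: return 0
--
--     contador_de_eventos = 0
--     contador_de_aviones = 0
--     máximos_aviones = 0
--
--     for evento in eventos:
--
--         if evento > 0: contador_de_aviones += 1
--         else: contador_de_aviones -= 1
--         if contador_de_aviones > aviones or contador_de_aviones > len(aeropuerto)-1: return 0
--
--         if contador_de_aviones > máximos_aviones: máximos_aviones = contador_de_aviones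
--
--         contador_de_eventos += evento
--         if contador_de_eventos < 0: return 0
--
--     return máximos_aviones
-- ===== SOURCE B (Python) =====
-- def verificar(aviones, aeropuerto, eventos):
--
--     if '==' not in aeropuerto: return 0
--     if len(aeropuerto) < 2: return 0
--
--     plane_counts = []
--     event_sums = []
--     c = 0
--     s = 0
--     for evento in eventos:
--         c = c + 1 if evento > 0 else c - 1
--         s = s + evento
--         plane_counts.append(c)
--         event_sums.append(s)
--
--     cap = len(aeropuerto) - 1
--     if any(x > aviones or x > cap for x in plane_counts) or any(x < 0 for x in event_sums):
--         return 0
--     return max([0] + plane_counts)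
-- ===== Notes on version B (the rewrite author's own statement) =====
-- stated objective: alternative
-- what changed: Replaces the single fused loop with three early exits by first materialising the running plane-count and event-sum prefix sequences, then deciding the result with whole-list any/max scans.
import Mathlib
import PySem

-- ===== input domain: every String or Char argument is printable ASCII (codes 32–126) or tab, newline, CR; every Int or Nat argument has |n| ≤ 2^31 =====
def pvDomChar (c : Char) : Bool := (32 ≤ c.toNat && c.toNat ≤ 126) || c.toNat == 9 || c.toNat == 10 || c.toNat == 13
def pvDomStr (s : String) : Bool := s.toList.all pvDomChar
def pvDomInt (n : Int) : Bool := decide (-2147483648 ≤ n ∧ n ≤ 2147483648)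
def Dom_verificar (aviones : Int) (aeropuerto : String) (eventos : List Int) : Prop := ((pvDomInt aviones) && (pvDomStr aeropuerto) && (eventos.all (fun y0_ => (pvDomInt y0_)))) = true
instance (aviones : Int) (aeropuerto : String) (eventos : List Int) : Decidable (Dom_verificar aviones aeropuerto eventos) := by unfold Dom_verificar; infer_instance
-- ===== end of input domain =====

-- B replaces A's fused early-exit loop by materialised prefix sequences plus whole-list any/max scans (alternative decomposition, same value).
-- ===== PORT A =====
def verificarLoopA (aviones cap : Int) : List Int → Int → Int → Int → Int
  | [], _, _, maximosAviones => maximosAviones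
  | evento :: rest, contEventos, contAviones, maximosAviones =>
    let contAviones' := if evento > 0 then contAviones + 1 else contAviones - 1
    if contAviones' > aviones ∨ contAviones' > cap then 0
    else
      let maximos' := if contAviones' > maximosAviones then contAviones' else maximosAviones
      let contEventos' := contEventos + evento
      if contEventos' < 0 then 0
      else verificarLoopA aviones cap rest contEventos' contAviones' maximos'

def verificar (aviones : Int) (aeropuerto : String) (eventos : List Int) : Int :=
  if ¬ (PySem.Str.isIn "==" aeropuerto = true) then 0
  else if PySem.Str.len aeropuerto < 2 then 0
  else verificarLoopA aviones (PySem.Str.len aeropuerto - 1) eventos 0 0 0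

-- ===== PORT B =====
-- the accumulation loop of Source B: returns (plane_counts, event_sums)
def verificarAccum : List Int → Int → Int → List Int × List Int
  | [], _, _ => ([], [])
  | evento :: rest, c, s =>
    let c' := if evento > 0 then c + 1 else c - 1
    let s' := s + evento
    let (pcs, ess) := verificarAccum rest c' s'
    (c' :: pcs, s' :: ess)

def verificar_alt (aviones : Int) (aeropuerto : String) (eventos : List Int) : Int :=
  if ¬ (PySem.Str.isIn "==" aeropuerto = true) then 0
  else if PySem.Str.len aeropuerto < 2 then 0
  else
    let acc := verificarAccum eventos 0 0
    let cap := PySem.Str.len aeropuerto - 1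
    if acc.1.any (fun x => decide (x > aviones) || decide (x > cap))
        || acc.2.any (fun x => decide (x < 0)) then 0
    else
      match PySem.List.max? ((0 : Int) :: acc.1) (fun y => y) with
      | some m => m
      | none => 0

-- ===== PRECONDITION & SPEC =====
def Spec_verificar (aviones : Int) (aeropuerto : String) (eventos : List Int) (out : Int) : Prop := out = verificar_alt aviones aeropuerto eventos
instance (aviones : Int) (aeropuerto : String) (eventos : List Int) (out : Int) : Decidable (Spec_verificar aviones aeropuerto eventos out) := by unfold Spec_verificar; infer_instance

-- ===== CLAIM (what is proved, stated in full; the proofs are below) =====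
def Claim_equal_verificar : Prop := ∀ (aviones : Int) (aeropuerto : String) (eventos : List Int), Dom_verificar aviones aeropuerto eventos → Spec_verificar aviones aeropuerto eventos (verificar aviones aeropuerto eventos)

-- ===== LEMMAS AND PROOFS =====

-- the key invariant: A's fused loop equals B's scan of the materialised prefix sequences
lemma loopA_eq_scan (aviones cap : Int) :
    ∀ (es : List Int) (ce ca m : Int),
      verificarLoopA aviones cap es ce ca m =
        (if (verificarAccum es ca ce).1.any (fun x => decide (x > aviones) || decide (x > cap))
            || (verificarAccum es ca ce).2.any (fun x => decide (x < 0)) then 0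
         else (verificarAccum es ca ce).1.foldl max m) := by
  intro es
  induction es with
  | nil => intro ce ca m; simp [verificarLoopA, verificarAccum]
  | cons e rest ih =>
    intro ce ca m
    simp only [verificarLoopA, verificarAccum]
    set ca' := if e > 0 then ca + 1 else ca - 1 with hca'
    by_cases hviol : ca' > aviones ∨ ca' > cap
    · rcases hviol with h | h <;> simp [h]
    · by_cases hneg : ce + e < 0
      · push Not at hviol
        simp [hneg, not_lt.mpr hviol.1, not_lt.mpr hviol.2]
      · push Not at hviol
        simp only [hneg, if_false]
        rw [ih (ce + e) ca' (if ca' > m then ca' else m)]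
        simp [not_lt.mpr hviol.1, not_lt.mpr hviol.2, hneg]
        have : max m ca' = if ca' > m then ca' else m := by
          rcases lt_or_ge m ca' with h | h
          · simp [h, max_eq_right h.le]
          · simp [not_lt.mpr h, max_eq_left h]
        rw [this]

-- ===== VERDICT (by name: the statement is the Claim_ definition above) =====
theorem verificar_spec : Claim_equal_verificar := by
  intro aviones aeropuerto eventos _
  unfold Spec_verificar verificar verificar_alt
  split_ifs with h1 h2
  all_goals try rfl
  simp only [loopA_eq_scan, PySem.List.max?_id_cons]
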